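-- pv_equiv track=rewrite | github.com/fitrimuslikhah/Algo-DS-Part2 | problem4/main.py | count_item_and_sort
-- ===== SOURCE A (Python) =====
-- def count_item_and_sort(items):
--     item_counts = {}
--     for item in items:
--         if item in item_counts:
--             item_counts[item] += 1
--         else:
--             item_counts[item] = 1
--
--     sorted_items = sorted(item_counts.items(), key=lambda x: (x[1], x[0]))
--
--     result = " ".join([f"{item}->{count}" for item, count in sorted_items])
--
--     return result
-- ===== SOURCE B (Python) =====
-- def count_item_and_sort(items):
--     pairs = []
--     for item in sorted(items):
--         if pairs and pairs[-1][0] == item: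
--             pairs[-1] = (item, pairs[-1][1] + 1)
--         else:
--             pairs.append((item, 1))
--     pairs.sort(key=lambda p: p[1])
--     return " ".join([f"{item}->{count}" for item, count in pairs])
-- ===== Notes on version B (the rewrite author's own statement) =====
-- stated objective: alternative
-- what changed: Replaces the hash-map counting pass followed by a (count, name) tuple sort with sort-first run-length grouping: the items are sorted once, consecutive equal runs are merged in one linear scan into (name, count) pairs already in alphabetical order, and a single stable sort keyed on count alone reproduces the (count, name) ordering.
import Mathlib
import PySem

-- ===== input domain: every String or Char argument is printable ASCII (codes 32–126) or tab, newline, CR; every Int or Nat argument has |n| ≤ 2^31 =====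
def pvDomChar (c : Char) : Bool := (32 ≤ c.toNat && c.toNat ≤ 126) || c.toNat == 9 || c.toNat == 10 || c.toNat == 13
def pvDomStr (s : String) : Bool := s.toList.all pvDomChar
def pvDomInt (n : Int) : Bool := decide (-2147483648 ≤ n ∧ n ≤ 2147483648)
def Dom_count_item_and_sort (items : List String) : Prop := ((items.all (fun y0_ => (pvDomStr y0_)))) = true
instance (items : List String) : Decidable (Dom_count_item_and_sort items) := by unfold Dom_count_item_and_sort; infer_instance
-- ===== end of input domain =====

-- B replaces A's hash-map counting + (count, name) tuple sort by sort-first run-length grouping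
-- followed by a stable sort on count alone (objective: alternative decomposition, same value).

-- ===== PORT A =====
-- dict counting loop; 'd[item] += 1' with item present is Dict.modify, 'd[item] = 1' is Dict.insert
def count_item_and_sort (items : List String) : String :=
  let item_counts : PySem.Dict String Int := items.foldl (fun d item =>
      if d.contains item then d.modify item 0 (· + 1) else d.insert item 1) PySem.Dict.empty
  let sorted_items := PySem.List.sorted2 item_counts.items (fun x => x.2) (fun x => x.1)
  PySem.Str.join " " (sorted_items.map (fun p => PySem.Str.join "" [p.1, "->", PySem.Int.toStr p.2]))

-- ===== PORT B =====
-- B's loop body: merge `item` into the last run (pairs[-1]) or append a fresh (item, 1) run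
def pvStepB (pairs : List (String × Int)) (item : String) : List (String × Int) :=
  match pairs.getLast? with
  | some p => if p.1 == item then pairs.dropLast ++ [(item, p.2 + 1)] else pairs ++ [(item, 1)]
  | none => pairs ++ [(item, 1)]

def count_item_and_sort_alt (items : List String) : String :=
  let pairs := (PySem.List.sorted items (fun x => x)).foldl pvStepB []
  let pairs2 := PySem.List.sorted pairs (fun p => p.2)
  PySem.Str.join " " (pairs2.map (fun p => PySem.Str.join "" [p.1, "->", PySem.Int.toStr p.2]))

-- ===== PRECONDITION & SPEC =====
def Spec_count_item_and_sort (items : List String) (out : String) : Prop := out = count_item_and_sort_alt items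
instance (items : List String) (out : String) : Decidable (Spec_count_item_and_sort items out) := by unfold Spec_count_item_and_sort; infer_instance

-- ===== CLAIM (what is proved, stated in full; the proofs are below) =====
def Claim_equal_count_item_and_sort : Prop := ∀ (items : List String), Dom_count_item_and_sort items → Spec_count_item_and_sort items (count_item_and_sort items)

-- ===== LEMMAS AND PROOFS =====

-- run-length encoding of a list (proof-side model of B's merging loop on a sorted list)
def pvRuns : List String → List (String × Int)
  | [] => []
  | x :: t =>
    (x, ((t.takeWhile (fun y => y == x)).length : Int) + 1) :: pvRuns (t.dropWhile (fun y => y == x))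
termination_by xs => xs.length
decreasing_by
  simp only [List.length_cons, Nat.lt_succ_iff]
  exact List.length_dropWhile_le (fun y => y == x) t

-- the lexicographic (count, name) key both sorted lists are strictly increasing under
def pvKey (p : String × Int) : Int ×ₗ String := toLex (p.2, p.1)

-- A's counting loop is collections.Counter
theorem pv_dictA_eq (items : List String) :
    items.foldl (fun d item => if d.contains item then d.modify item 0 (· + 1) else d.insert item 1)
      PySem.Dict.empty = PySem.Dict.counter items := by
  rw [PySem.Dict.counter_eq_foldl]
  congr 1
  funext d x
  by_cases h : d.contains x
  · simp [h]
  · have hg : d.getD x 0 = 0 := by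
      simp [PySem.Dict.getD, (PySem.Dict.get?_eq_none_iff_contains d x).mpr (by simp [h])]
    simp [h, PySem.Dict.modify, hg]

-- on a sorted list x :: t, x does not occur after the initial run of copies of x
theorem pv_x_not_dropWhile (x : String) (t : List String) (h : (x :: t).Pairwise (· ≤ ·)) :
    x ∉ t.dropWhile (fun y => y == x) := by
  obtain ⟨hle, hpt⟩ := List.pairwise_cons.mp h
  have hdsub : (t.dropWhile (fun y => y == x)).Sublist t := List.dropWhile_sublist _
  have hdw_pw : (t.dropWhile (fun y => y == x)).Pairwise (· ≤ ·) := hpt.sublist hdsub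
  intro hmem
  have hne : t.dropWhile (fun y => y == x) ≠ [] := by
    intro he; rw [he] at hmem; simp at hmem
  have hyne : (t.dropWhile (fun y => y == x)).head hne ≠ x := by
    simpa using List.head_dropWhile_not (fun y => y == x) hne
  have h1 : x ≤ (t.dropWhile (fun y => y == x)).head hne :=
    hle _ (hdsub.mem (List.head_mem hne))
  rw [← List.cons_head_tail hne] at hmem hdw_pw
  obtain ⟨hhle, -⟩ := List.pairwise_cons.mp hdw_pw
  rcases List.mem_cons.mp hmem with he | hmem'
  · exact hyne he.symm
  · exact hyne (le_antisymm (hhle x hmem') h1)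

-- pvRuns of a sorted list: strictly increasing names, counts are multiplicities, all elements named
theorem pvRuns_spec : ∀ (xs : List String), xs.Pairwise (· ≤ ·) →
    ((pvRuns xs).map Prod.fst).Pairwise (· < ·)
    ∧ (∀ p ∈ pvRuns xs, p.1 ∈ xs ∧ p.2 = (xs.count p.1 : Int))
    ∧ (∀ k ∈ xs, k ∈ (pvRuns xs).map Prod.fst) := by
  intro xs
  induction xs using pvRuns.induct with
  | case1 => intro _; simp [pvRuns]
  | case2 x t ih =>
    intro h
    obtain ⟨hle, hpt⟩ := List.pairwise_cons.mp h
    have htwx : ∀ y ∈ t.takeWhile (fun y => y == x), y = x := fun y hy => by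
      simpa using List.mem_takeWhile_imp hy
    have hdsub : (t.dropWhile (fun y => y == x)).Sublist t := List.dropWhile_sublist _
    have hdw_pw : (t.dropWhile (fun y => y == x)).Pairwise (· ≤ ·) := hpt.sublist hdsub
    have hxledw : ∀ y ∈ t.dropWhile (fun y => y == x), x ≤ y := fun y hy => hle y (hdsub.mem hy)
    have hxdw : x ∉ t.dropWhile (fun y => y == x) := pv_x_not_dropWhile x t h
    have htcat : t.takeWhile (fun y => y == x) ++ t.dropWhile (fun y => y == x) = t :=
      List.takeWhile_append_dropWhile
    have hcx : (x :: t).count x = (t.takeWhile (fun y => y == x)).length + 1 := by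
      rw [List.count_cons_self]
      conv_lhs => rw [← htcat]
      rw [List.count_append]
      have h1 : (t.takeWhile (fun y => y == x)).count x = (t.takeWhile (fun y => y == x)).length :=
        List.count_eq_length.mpr (fun b hb => (htwx b hb).symm)
      have h2 : (t.dropWhile (fun y => y == x)).count x = 0 := List.count_eq_zero.mpr hxdw
      omega
    have hcount_rest : ∀ k ∈ t.dropWhile (fun y => y == x),
        (x :: t).count k = (t.dropWhile (fun y => y == x)).count k := by
      intro k hk
      have hkx : k ≠ x := fun he => hxdw (he ▸ hk)
      have h1 : (t.takeWhile (fun y => y == x)).count k = 0 :=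
        List.count_eq_zero.mpr (fun hmem => hkx (htwx k hmem))
      rw [List.count_cons_of_ne (Ne.symm hkx)]
      conv_lhs => rw [← htcat]
      rw [List.count_append]
      omega
    obtain ⟨ihpw, ihmc, ihcov⟩ := ih hdw_pw
    refine ⟨?_, ?_, ?_⟩
    · simp only [pvRuns, List.map_cons, List.pairwise_cons]
      refine ⟨?_, ihpw⟩
      intro k hk
      obtain ⟨p, hp, rfl⟩ := List.mem_map.mp hk
      have hk1 : p.1 ∈ t.dropWhile (fun y => y == x) := (ihmc p hp).1
      exact (hxledw p.1 hk1).lt_of_ne (fun he => hxdw (he ▸ hk1))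
    · simp only [pvRuns, List.mem_cons]
      rintro p (rfl | hp)
      · refine ⟨by simp, ?_⟩
        simp only [hcx]
        push_cast
        ring
      · obtain ⟨h1, h2⟩ := ihmc p hp
        exact ⟨Or.inr (hdsub.mem h1), by rw [h2, hcount_rest p.1 h1]⟩
    · intro k hk
      simp only [pvRuns, List.map_cons, List.mem_cons]
      rcases List.mem_cons.mp hk with rfl | hk'
      · exact Or.inl rfl
      · rw [← htcat] at hk'
        rcases List.mem_append.mp hk' with h1 | h2
        · exact Or.inl (htwx k h1)
        · exact Or.inr (ihcov k h2)

-- B's loop absorbs a block of copies of x into the trailing run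
theorem pv_merge (x : String) : ∀ (tw : List String), (∀ y ∈ tw, y = x) →
    ∀ (acc : List (String × Int)) (c : Int),
    tw.foldl pvStepB (acc ++ [(x, c)]) = acc ++ [(x, c + tw.length)] := by
  intro tw
  induction tw with
  | nil => intro _ acc c; simp
  | cons y ys ih =>
    intro hall acc c
    have hy : y = x := hall y (by simp)
    subst hy
    have hstep : pvStepB (acc ++ [(y, c)]) y = acc ++ [(y, c + 1)] := by
      simp [pvStepB]
    rw [List.foldl_cons, hstep, ih (fun z hz => hall z (by simp [hz])) acc (c + 1)]
    have hc : c + 1 + (ys.length : Int) = c + ((ys.length : Int) + 1) := by ring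
    simp only [List.length_cons, Nat.cast_add, Nat.cast_one, hc]

-- B's merging fold over a sorted list produces exactly the run-length encoding
theorem pv_foldB : ∀ (xs : List String), xs.Pairwise (· ≤ ·) →
    ∀ (acc : List (String × Int)), (∀ p ∈ acc.getLast?, p.1 ∉ xs) →
    xs.foldl pvStepB acc = acc ++ pvRuns xs := by
  intro xs
  induction xs using pvRuns.induct with
  | case1 => intro _ acc _; simp [pvRuns]
  | case2 x t ih =>
    intro h acc hacc
    obtain ⟨hle, hpt⟩ := List.pairwise_cons.mp h
    have htwx : ∀ y ∈ t.takeWhile (fun y => y == x), y = x := fun y hy => by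
      simpa using List.mem_takeWhile_imp hy
    have hdsub : (t.dropWhile (fun y => y == x)).Sublist t := List.dropWhile_sublist _
    have hdw_pw : (t.dropWhile (fun y => y == x)).Pairwise (· ≤ ·) := hpt.sublist hdsub
    have hxdw : x ∉ t.dropWhile (fun y => y == x) := pv_x_not_dropWhile x t h
    have htcat : t.takeWhile (fun y => y == x) ++ t.dropWhile (fun y => y == x) = t :=
      List.takeWhile_append_dropWhile
    have hstep1 : pvStepB acc x = acc ++ [(x, 1)] := by
      cases hacl : acc.getLast? with
      | none => simp [pvStepB, hacl]
      | some p =>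
        have hne : p.1 ≠ x := by
          intro he
          exact hacc p (Option.mem_def.mpr hacl) (by simp [he])
        simp [pvStepB, hacl, hne]
    rw [List.foldl_cons, hstep1]
    conv_lhs => rw [← htcat]
    rw [List.foldl_append, pv_merge x _ htwx acc 1,
      ih hdw_pw _ (by
        intro p hp
        rw [List.getLast?_concat, Option.mem_def, Option.some.injEq] at hp
        rw [← hp]
        exact hxdw)]
    rw [List.append_assoc]
    congr 1
    simp only [pvRuns, List.singleton_append, List.cons.injEq, Prod.mk.injEq, true_and, and_true]
    omega

-- insertBy only compares the inserted element with list members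
theorem pv_insertBy_congr {α : Type} (b1 b2 : α → α → Bool) (x : α) (acc : List α)
    (h : ∀ a ∈ acc, b1 x a = b2 x a) :
    PySem.List.insertBy b1 x acc = PySem.List.insertBy b2 x acc := by
  induction acc with
  | nil => rfl
  | cons y ys ih =>
    have hy := h y (by simp)
    simp only [PySem.List.insertBy, hy]
    by_cases hb : b2 x y
    · simp [hb]
    · simp only [hb]
      have := ih (fun a ha => h a (by simp [ha]))
      simpa [PySem.List.insertBy] using this

-- two insertion sorts agree when the comparators agree on (later, earlier) pairs
theorem pv_foldl_insertBy_congr {α : Type} : ∀ (xs : List α) (b1 b2 : α → α → Bool),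
    List.Pairwise (fun a x => b1 x a = b2 x a) xs →
    ∀ (acc : List α), (∀ a ∈ acc, ∀ x ∈ xs, b1 x a = b2 x a) →
    xs.foldl (fun acc x => PySem.List.insertBy b1 x acc) acc
      = xs.foldl (fun acc x => PySem.List.insertBy b2 x acc) acc := by
  intro xs
  induction xs with
  | nil => intro _ _ _ _ _; rfl
  | cons x t ih =>
    intro b1 b2 hp acc hacc
    rw [List.pairwise_cons] at hp
    simp only [List.foldl_cons]
    rw [pv_insertBy_congr b1 b2 x acc (fun a ha => hacc a ha x (by simp))]
    exact ih b1 b2 hp.2 _ (fun a ha y hy => by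
      rcases (PySem.List.insertBy_mem_iff b2 x a acc).mp ha with rfl | ha'
      · exact hp.1 y hy
      · exact hacc a ha' y (by simp [hy]))

-- Python's key=lambda x: (x[1], x[0]) comparator is the lexicographic order pvKey
theorem pv_lex_cmp (a b : String × Int) :
    (decide (a.2 < b.2) || (!decide (b.2 < a.2) && decide (a.1 < b.1)))
      = decide (pvKey a < pvKey b) := by
  have : (pvKey a < pvKey b) ↔ (a.2 < b.2 ∨ (a.2 = b.2 ∧ a.1 < b.1)) := Prod.Lex.toLex_lt_toLex
  rcases lt_trichotomy a.2 b.2 with h | h | h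
  · simp [this, h, asymm h]
  · simp [this, h]
  · simp [this, h, asymm h, ne_of_gt h]

-- sorted2 by (count, name) is sorted by the single lexicographic key pvKey
theorem pv_sorted2_eq_sorted_lex (l : List (String × Int)) :
    PySem.List.sorted2 l (fun x => x.2) (fun x => x.1)
      = PySem.List.sorted l pvKey := by
  simp only [PySem.List.sorted2, PySem.List.sorted, if_neg (by decide : ¬ (false = true))]
  congr 1
  funext acc x
  congr 1
  funext a b
  exact pv_lex_cmp a b

-- a stable sort on count alone, applied to a list with strictly increasing names,
-- coincides with the sort by the lexicographic key pvKey
theorem pv_sorted_count_eq_sorted_lex (l : List (String × Int))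
    (h : (l.map Prod.fst).Pairwise (· < ·)) :
    PySem.List.sorted l (fun p => p.2) = PySem.List.sorted l pvKey := by
  simp only [PySem.List.sorted, if_neg (by decide : ¬ (false = true))]
  apply pv_foldl_insertBy_congr l _ _ _ [] (by simp)
  rw [List.pairwise_map] at h
  refine h.imp ?_
  intro a x hax
  refine decide_eq_decide.mpr ?_
  unfold pvKey
  rw [Prod.Lex.toLex_lt_toLex]
  constructor
  · exact fun hx => Or.inl hx
  · rintro (hx | ⟨-, hx⟩)
    · exact hx
    · exact absurd hax (asymm hx)

-- the two sorted pair lists coincide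
theorem pv_lists_eq (items : List String) :
    PySem.List.sorted2
        (items.foldl (fun d item => if d.contains item then d.modify item 0 (· + 1) else d.insert item 1)
          PySem.Dict.empty).items (fun x => x.2) (fun x => x.1)
      = PySem.List.sorted ((PySem.List.sorted items (fun x => x)).foldl pvStepB []) (fun p => p.2) := by
  have hsort : (PySem.List.sorted items (fun x => x)).Pairwise (· ≤ ·) := by
    simpa using PySem.List.sorted_pairwise items (fun x => x)
  obtain ⟨hpw, hmc, hcov⟩ := pvRuns_spec _ hsort
  rw [pv_dictA_eq items, pv_sorted2_eq_sorted_lex, pv_foldB _ hsort [] (by simp),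
    List.nil_append, pv_sorted_count_eq_sorted_lex _ hpw]
  have hperm_srt : (PySem.List.sorted items (fun x => x)).Perm items :=
    PySem.List.sorted_perm items (fun x => x) false
  have hRmap : pvRuns (PySem.List.sorted items (fun x => x))
      = ((pvRuns (PySem.List.sorted items (fun x => x))).map Prod.fst).map
          (fun k => (k, (List.count k items : Int))) := by
    rw [List.map_map]
    calc pvRuns (PySem.List.sorted items (fun x => x))
        = (pvRuns (PySem.List.sorted items (fun x => x))).map id := (List.map_id _).symm
      _ = _ := List.map_congr_left (fun p hp => by
          obtain ⟨h1, h2⟩ := hmc p hp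
          have hc : List.count p.1 (PySem.List.sorted items (fun x => x)) = List.count p.1 items :=
            hperm_srt.count_eq p.1
          cases p
          simp only [Function.comp, id]
          simp only [Prod.mk.injEq, true_and]
          simp only at h2
          rw [h2, hc])
  have hnd : ((pvRuns (PySem.List.sorted items (fun x => x))).map Prod.fst).Nodup :=
    List.Pairwise.imp (fun h => ne_of_lt h) hpw
  have hkeys : ((pvRuns (PySem.List.sorted items (fun x => x))).map Prod.fst).Perm
      (PySem.Set.ofList items) := by
    refine (List.perm_ext_iff_of_nodup hnd (PySem.Set.nodup_ofList items)).mpr (fun k => ?_)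
    rw [PySem.Set.mem_ofList]
    constructor
    · intro hk
      obtain ⟨p, hp, rfl⟩ := List.mem_map.mp hk
      exact hperm_srt.mem_iff.mp (hmc p hp).1
    · intro hk
      exact hcov k ((PySem.List.mem_sorted items (fun x => x) false k).mpr hk)
  have hperm : (PySem.Dict.counter items).items.Perm
      (pvRuns (PySem.List.sorted items (fun x => x))) := by
    rw [PySem.Dict.items_counter, hRmap]
    exact (hkeys.map (fun k => (k, (List.count k items : Int)))).symm
  refine PySem.List.sorted_eq_sorted_of_perm _ _ pvKey ?_ hperm
  intro p q hpq
  have h2 := toLex.injective hpq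
  cases p; cases q; simpa [Prod.ext_iff, and_comm] using h2

-- ===== VERDICT (by name: the statement is the Claim_ definition above) =====
theorem count_item_and_sort_spec : Claim_equal_count_item_and_sort := by
  intro items _
  show count_item_and_sort items = count_item_and_sort_alt items
  unfold count_item_and_sort count_item_and_sort_alt
  simp only []
  rw [pv_lists_eq items]
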